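-- pv_equiv track=rewrite | github.com/Pataclop/beautiful-tides | main.py | remove_lines_after_marker
-- ===== SOURCE A (Python) =====
-- def remove_lines_after_marker(text, marker):
--     lines = text.split("\n")
--     output_lines = []
--     found_marker = False
--
--     for line in lines:
--         if marker in line:
--             found_marker = True
--         if not found_marker:
--             output_lines.append(line)
--     result = "\n".join(output_lines)
--     return result
-- ===== SOURCE B (Python) =====
-- def remove_lines_after_marker(text, marker):
--     lines = text.split("\n")
--     cut = next((i for i, line in enumerate(lines) if marker in line), len(lines))
--     return "\n".join(lines[:cut])
-- ===== Notes on version B (the rewrite author's own statement) =====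
-- stated objective: simpler
-- what changed: B computes the first marker-line index up front (next/enumerate) and returns one slice-and-join, instead of A's single pass maintaining an output list plus a found-marker flag.
import Mathlib
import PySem

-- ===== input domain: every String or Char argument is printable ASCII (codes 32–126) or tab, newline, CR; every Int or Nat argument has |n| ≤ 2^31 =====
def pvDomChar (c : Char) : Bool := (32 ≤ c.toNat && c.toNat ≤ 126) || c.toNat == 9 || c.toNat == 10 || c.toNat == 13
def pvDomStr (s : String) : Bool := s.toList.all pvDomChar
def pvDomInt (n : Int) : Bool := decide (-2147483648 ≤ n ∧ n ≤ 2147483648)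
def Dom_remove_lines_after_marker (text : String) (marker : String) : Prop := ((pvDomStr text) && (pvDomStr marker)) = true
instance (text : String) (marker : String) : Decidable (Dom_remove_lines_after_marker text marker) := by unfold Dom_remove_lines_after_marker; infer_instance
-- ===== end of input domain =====

-- B keeps a single cut index (first line containing the marker) and does one slice-and-join,
-- instead of A's loop maintaining an output list plus a found-marker flag; objective: simpler.

-- ===== PORT A =====
-- A's loop body: update found flag, append line only while flag still false.
def pvStepA (marker : String) (st : List String × Bool) (line : String) : List String × Bool :=
  let found := if PySem.Str.isIn marker line then true else st.2
  (if found = false then st.1 ++ [line] else st.1, found)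

def remove_lines_after_marker (text : String) (marker : String) : String :=
  let lines := (PySem.Str.split? text "\n").getD []   -- sep = "\n" ≠ "", so split? is always some
  let st := lines.foldl (pvStepA marker) ([], false)
  PySem.Str.join "\n" st.1

-- ===== PORT B =====
def remove_lines_after_marker_alt (text : String) (marker : String) : String :=
  let lines := (PySem.Str.split? text "\n").getD []   -- sep = "\n" ≠ "", so split? is always some
  let cut := lines.findIdx (fun line => PySem.Str.isIn marker line)   -- = next((i for i,l in enumerate(lines) if marker in l), len(lines))
  PySem.Str.join "\n" (lines.take cut)

-- ===== PRECONDITION & SPEC =====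
def Spec_remove_lines_after_marker (text : String) (marker : String) (out : String) : Prop := out = remove_lines_after_marker_alt text marker
instance (text : String) (marker : String) (out : String) : Decidable (Spec_remove_lines_after_marker text marker out) := by unfold Spec_remove_lines_after_marker; infer_instance

-- ===== CLAIM (what is proved, stated in full; the proofs are below) =====
def Claim_equal_remove_lines_after_marker : Prop := ∀ (text : String) (marker : String), Dom_remove_lines_after_marker text marker → Spec_remove_lines_after_marker text marker (remove_lines_after_marker text marker)

-- ===== LEMMAS AND PROOFS =====

-- Once the flag is true, A's loop never appends again.
theorem foldA_true (marker : String) (ls : List String) (acc : List String) :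
    ls.foldl (pvStepA marker) (acc, true) = (acc, true) := by
  induction ls generalizing acc with
  | nil => rfl
  | cons l ls ih =>
    rw [List.foldl_cons]
    have h : pvStepA marker (acc, true) l = (acc, true) := by simp [pvStepA]
    rw [h]; exact ih acc

-- With the flag false, A's loop appends exactly the longest marker-free prefix.
theorem foldA_false (marker : String) (ls : List String) (acc : List String) :
    (ls.foldl (pvStepA marker) (acc, false)).1
      = acc ++ ls.takeWhile (fun l => !PySem.Str.isIn marker l) := by
  induction ls generalizing acc with
  | nil => simp
  | cons l ls ih =>
    rw [List.foldl_cons]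
    by_cases h : PySem.Str.isIn marker l
    all_goals simp only [PySem.Str.isIn_eq] at h
    · have hs : pvStepA marker (acc, false) l = (acc, true) := by simp [pvStepA, h]
      rw [hs, foldA_true]
      simp [h]
    · have hs : pvStepA marker (acc, false) l = (acc ++ [l], false) := by simp [pvStepA, h]
      rw [hs, ih]
      simp [h]

-- B's slice at the first hit index is that same prefix.
theorem take_findIdx_eq_takeWhile (p : String → Bool) (ls : List String) :
    ls.take (ls.findIdx p) = ls.takeWhile (fun l => !p l) := by
  induction ls with
  | nil => rfl
  | cons l ls ih =>
    by_cases h : p l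
    · simp [List.findIdx_cons, h]
    · simp [List.findIdx_cons, h, ih]

-- ===== VERDICT (by name: the statement is the Claim_ definition above) =====
theorem remove_lines_after_marker_spec : Claim_equal_remove_lines_after_marker := by
  intro text marker _
  unfold Spec_remove_lines_after_marker remove_lines_after_marker remove_lines_after_marker_alt
  simp only
  rw [foldA_false, take_findIdx_eq_takeWhile]
  simp
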